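-- pv_equiv track=rewrite | github.com/Arsen1302/Code-copy-detector | TestData/solutions/problem_1456_2.py | solution_1456_2
-- ===== SOURCE A (Python) =====
-- def solution_1456_2(s: str) -> bool:
--     appeared_b = False
--     for char in s:
--         if char == 'b':
--             appeared_b = True
--         else:
--             if appeared_b:
--                 return False
--     return True
-- ===== SOURCE B (Python) =====
-- def solution_1456_2(s: str) -> bool:
--     # strip all trailing 'b's; the string is valid iff no 'b' remains
--     return 'b' not in s.rstrip('b')
-- ===== Notes on version B (the rewrite author's own statement) =====
-- stated objective: simpler
-- what changed: Replaces A's stateful early-exit scan (a seen-'b' flag checked against every later character) with a one-line strip-then-membership test: drop the trailing run of 'b's and check that no 'b' remains.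
import Mathlib
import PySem

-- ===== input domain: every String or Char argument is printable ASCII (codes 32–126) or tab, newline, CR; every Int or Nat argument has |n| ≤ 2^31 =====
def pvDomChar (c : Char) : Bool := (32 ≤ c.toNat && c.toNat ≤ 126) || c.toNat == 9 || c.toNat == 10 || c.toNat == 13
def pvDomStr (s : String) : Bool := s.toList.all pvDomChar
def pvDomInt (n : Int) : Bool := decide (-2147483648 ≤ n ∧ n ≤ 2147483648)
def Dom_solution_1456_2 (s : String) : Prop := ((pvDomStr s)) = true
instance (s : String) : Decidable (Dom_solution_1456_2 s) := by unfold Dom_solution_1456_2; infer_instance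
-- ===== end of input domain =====

-- B replaces A's stateful early-exit scan with a strip-then-membership one-liner (objective: simpler).

-- ===== PORT A =====
-- the for-loop with the appeared_b flag and the early 'return False'
def solution_1456_2_loop (cs : List Char) (appeared_b : Bool) : Bool :=
  match cs with
  | [] => true
  | c :: rest =>
    if c == 'b' then solution_1456_2_loop rest true
    else if appeared_b then false
    else solution_1456_2_loop rest appeared_b

def solution_1456_2 (s : String) : Bool :=
  solution_1456_2_loop s.toList false

-- ===== PORT B =====
-- s.rstrip('b') ported by hand (PySem has no single-argument rstrip-with-chars):
-- reverse, drop the leading run of 'b's, reverse back — exact for rstrip with a one-char set.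
-- 'b' not in t : single-character membership, exactly List.contains on the code points.
def solution_1456_2_alt (s : String) : Bool :=
  let t := (s.toList.reverse.dropWhile (· == 'b')).reverse
  !(t.contains 'b')

-- ===== PRECONDITION & SPEC =====
def Spec_solution_1456_2 (s : String) (out : Bool) : Prop := out = solution_1456_2_alt s
instance (s : String) (out : Bool) : Decidable (Spec_solution_1456_2 s out) := by unfold Spec_solution_1456_2; infer_instance

-- ===== CLAIM (what is proved, stated in full; the proofs are below) =====
def Claim_equal_solution_1456_2 : Prop := ∀ (s : String), Dom_solution_1456_2 s → Spec_solution_1456_2 s (solution_1456_2 s)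

-- ===== LEMMAS AND PROOFS =====

-- with the flag set, the remaining characters must all be 'b'
theorem loop_true_eq_all (cs : List Char) :
    solution_1456_2_loop cs true = cs.all (· == 'b') := by
  induction cs with
  | nil => rfl
  | cons c rest ih =>
    by_cases h : c = 'b' <;> simp [solution_1456_2_loop, h, ih]

-- main invariant: the flag-false loop equals "no 'b' before the trailing run of 'b's"
theorem loop_false_eq_alt (cs : List Char) :
    solution_1456_2_loop cs false
      = !(((cs.reverse.dropWhile (· == 'b')).reverse).contains 'b') := by
  induction cs with
  | nil => rfl
  | cons c rest ih =>
    have happ :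
        (c :: rest).reverse.dropWhile (· == 'b')
          = if (rest.reverse.dropWhile (· == 'b')).isEmpty then
              List.dropWhile (· == 'b') [c]
            else rest.reverse.dropWhile (· == 'b') ++ [c] := by
      simp [List.reverse_cons, List.dropWhile_append]
    by_cases hc : c = 'b'
    · subst hc
      rw [show solution_1456_2_loop ('b' :: rest) false = solution_1456_2_loop rest true from rfl,
          loop_true_eq_all, happ]
      by_cases hem : (rest.reverse.dropWhile (· == 'b')) = []
      · rw [if_pos (by simp [hem])]
        have hd : List.dropWhile (fun x => x == 'b') ['b'] = [] := by decide
        rw [hd]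
        simp only [List.dropWhile_eq_nil_iff] at hem
        simp only [List.reverse_nil, List.contains_eq_mem, List.not_mem_nil, decide_false,
          Bool.not_false, List.all_eq_true]
        intro x hx
        exact hem x (by simpa using hx)
      · rw [if_neg (by simpa using hem)]
        have hcon : ((rest.reverse.dropWhile (· == 'b') ++ ['b']).reverse).contains 'b' = true := by
          simp
        rw [hcon]
        obtain ⟨x, hx, hxb⟩ : ∃ x ∈ rest.reverse, ¬(x == 'b') = true := by
          by_contra h
          push Not at h
          exact hem (List.dropWhile_eq_nil_iff.mpr h)
        simp only [Bool.not_true, List.all_eq_false]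
        exact ⟨x, by simpa using hx, hxb⟩
    · rw [show solution_1456_2_loop (c :: rest) false = solution_1456_2_loop rest false from by
          simp [solution_1456_2_loop, hc], ih, happ]
      have hcb : (c == 'b') = false := by simp [hc]
      by_cases hem : (rest.reverse.dropWhile (· == 'b')) = []
      · rw [if_pos (by simp [hem]), hem]
        simp [List.dropWhile, hcb, Ne.symm hc]
      · rw [if_neg (by simpa using hem)]
        simp [Ne.symm hc]

-- ===== VERDICT (by name: the statement is the Claim_ definition above) =====
theorem solution_1456_2_spec : Claim_equal_solution_1456_2 := by
  intro s _
  show solution_1456_2 s = solution_1456_2_alt s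
  simp [solution_1456_2, solution_1456_2_alt, loop_false_eq_alt]
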